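-- pv_equiv track=rewrite | github.com/Copper-Head/datierung | backup/sundayletter.py | narrow_to_century
-- ===== SOURCE A (Python) =====
-- CENTURIES = {0:0,100:-1,200:-2,300:-3,400:-4,500:-5}
--
-- def narrow_to_century(year):
-- 	tempCent = {}
-- 	for cent in CENTURIES:
-- 		if year-cent > 0:
-- 			tempCent[cent] = CENTURIES[cent]
-- 	for c in tempCent:
-- 		if year-c == min(year-cent for cent in tempCent):
-- 			return (tempCent[c], year-c)
-- ===== SOURCE B (Python) =====
-- CENTURIES = {0:0,100:-1,200:-2,300:-3,400:-4,500:-5}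
--
-- def narrow_to_century(year):
--     for c in sorted(CENTURIES, reverse=True):
--         if year - c > 0:
--             return (CENTURIES[c], year - c)
--     return None
-- ===== Notes on version B (the rewrite author's own statement) =====
-- stated objective: simpler
-- what changed: Replaces the build-a-temp-dict-then-rescan-with-min structure by a single descending scan over the boundaries that returns on the first qualifying one.
import Mathlib
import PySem

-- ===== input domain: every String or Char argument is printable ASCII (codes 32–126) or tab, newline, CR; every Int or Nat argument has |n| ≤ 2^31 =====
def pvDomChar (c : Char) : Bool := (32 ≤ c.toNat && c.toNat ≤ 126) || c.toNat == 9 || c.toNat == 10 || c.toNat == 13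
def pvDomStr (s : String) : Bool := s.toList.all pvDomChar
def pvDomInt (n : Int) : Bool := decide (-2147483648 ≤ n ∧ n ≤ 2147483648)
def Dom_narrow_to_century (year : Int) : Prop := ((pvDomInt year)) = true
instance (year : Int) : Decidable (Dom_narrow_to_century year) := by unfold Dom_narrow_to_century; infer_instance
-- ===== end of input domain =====

-- B replaces A's temp-dict-plus-min rescan by one descending scan returning the first qualifying boundary (simpler decomposition, same values).

-- ===== PORT A =====
-- CENTURIES = {0:0,100:-1,200:-2,300:-3,400:-4,500:-5}
def centuriesA : PySem.Dict Int Int :=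
  PySem.Dict.mk [(0,0),(100,-1),(200,-2),(300,-3),(400,-4),(500,-5)]

def narrow_to_century (year : Int) : Option (Int × Int) :=
  -- first loop: tempCent[cent] = CENTURIES[cent] for qualifying cent
  let tempCent : PySem.Dict Int Int :=
    (PySem.Dict.keys centuriesA).foldl
      (fun (d : PySem.Dict Int Int) cent =>
        if year - cent > 0 then d.insert cent ((centuriesA.get? cent).getD 0) else d)
      PySem.Dict.empty
  -- second loop: return on the first c with year - c == min(year - cent for cent in tempCent);
  -- the min generator is only evaluated when tempCent is nonempty, so min? is some there.
  let m := PySem.List.min? ((PySem.Dict.keys tempCent).map (fun c => year - c)) (fun x => x)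
  ((PySem.Dict.items tempCent).find? (fun p => some (year - p.1) == m)).map
    (fun p => (p.2, year - p.1))

-- ===== PORT B =====
-- sorted(CENTURIES, reverse=True)
def centSorted : List Int := PySem.List.sorted (PySem.Dict.keys centuriesA) (fun x => x) true

def altLoop (year : Int) : List Int → Option (Int × Int)
  | [] => none
  | c :: rest =>
      if year - c > 0 then some ((centuriesA.get? c).getD 0, year - c) else altLoop year rest

def narrow_to_century_alt (year : Int) : Option (Int × Int) := altLoop year centSorted

-- ===== PRECONDITION & SPEC =====
def Spec_narrow_to_century (year : Int) (out : Option (Int × Int)) : Prop := out = narrow_to_century_alt year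
instance (year : Int) (out : Option (Int × Int)) : Decidable (Spec_narrow_to_century year out) := by unfold Spec_narrow_to_century; infer_instance

-- ===== CLAIM (what is proved, stated in full; the proofs are below) =====
def Claim_equal_narrow_to_century : Prop := ∀ (year : Int), Dom_narrow_to_century year → Spec_narrow_to_century year (narrow_to_century year)

-- ===== LEMMAS AND PROOFS =====

-- ===== VERDICT (by name: the statement is the Claim_ definition above) =====
theorem narrow_to_century_spec : Claim_equal_narrow_to_century := by
  intro year _
  unfold Spec_narrow_to_century
  by_cases h500 : (500:Int) < year
  · simp [narrow_to_century, narrow_to_century_alt, altLoop, centSorted, centuriesA, h500, (show (400:Int) < year from by omega), (show (300:Int) < year from by omega), (show (200:Int) < year from by omega), (show (100:Int) < year from by omega), (show (0:Int) < year from by omega), (show ¬(year = year - 500) from by omega), (show ((year - 100 : Int) == year - 500) = false from by simp [sub_right_inj]), (show ((year - 200 : Int) == year - 500) = false from by simp [sub_right_inj]), (show ((year - 300 : Int) == year - 500) = false from by simp [sub_right_inj]), (show ((year - 400 : Int) == year - 500) = false from by simp [sub_right_inj]), beq_iff_eq, PySem.Dict.empty, PySem.Dict.insert, PySem.Dict.keys,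 PySem.Dict.get?, PySem.List.min?, PySem.List.sorted, PySem.List.insertBy, List.find?]
  by_cases h400 : (400:Int) < year
  · simp [narrow_to_century, narrow_to_century_alt, altLoop, centSorted, centuriesA, h400, h500, (show (300:Int) < year from by omega), (show (200:Int) < year from by omega), (show (100:Int) < year from by omega), (show (0:Int) < year from by omega), (show ¬(year = year - 400) from by omega), (show ((year - 100 : Int) == year - 400) = false from by simp [sub_right_inj]), (show ((year - 200 : Int) == year - 400) = false from by simp [sub_right_inj]), (show ((year - 300 : Int) == year - 400) = false from by simp [sub_right_inj]), beq_iff_eq, PySem.Dict.empty, PySem.Dict.insert, PySem.Dict.keys, PySem.Dict.get?, PySem.List.min?, PySem.List.sorted, PySem.List.insertBy, List.find?]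
  by_cases h300 : (300:Int) < year
  · simp [narrow_to_century, narrow_to_century_alt, altLoop, centSorted, centuriesA, h300, h500, h400, (show (200:Int) < year from by omega), (show (100:Int) < year from by omega), (show (0:Int) < year from by omega), (show ¬(year = year - 300) from by omega), (show ((year - 100 : Int) == year - 300) = false from by simp [sub_right_inj]), (show ((year - 200 : Int) == year - 300) = false from by simp [sub_right_inj]), beq_iff_eq, PySem.Dict.empty, PySem.Dict.insert, PySem.Dict.keys, PySem.Dict.get?, PySem.List.min?, PySem.List.sorted, PySem.List.insertBy, List.find?]
  by_cases h200 : (200:Int) < year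
  · simp [narrow_to_century, narrow_to_century_alt, altLoop, centSorted, centuriesA, h200, h500, h400, h300, (show (100:Int) < year from by omega), (show (0:Int) < year from by omega), (show ¬(year = year - 200) from by omega), (show ((year - 100 : Int) == year - 200) = false from by simp [sub_right_inj]), beq_iff_eq, PySem.Dict.empty, PySem.Dict.insert, PySem.Dict.keys, PySem.Dict.get?, PySem.List.min?, PySem.List.sorted, PySem.List.insertBy, List.find?]
  by_cases h100 : (100:Int) < year
  · simp [narrow_to_century, narrow_to_century_alt, altLoop, centSorted, centuriesA, h100, h500, h400, h300, h200, (show (0:Int) < year from by omega), (show ¬(year = year - 100) from by omega), beq_iff_eq, PySem.Dict.empty, PySem.Dict.insert, PySem.Dict.keys, PySem.Dict.get?, PySem.List.min?, PySem.List.sorted, PySem.List.insertBy, List.find?]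
  by_cases h0 : (0:Int) < year
  · simp [narrow_to_century, narrow_to_century_alt, altLoop, centSorted, centuriesA, h0, h500, h400, h300, h200, h100, beq_iff_eq, PySem.Dict.empty, PySem.Dict.insert, PySem.Dict.keys, PySem.Dict.get?, PySem.List.min?, PySem.List.sorted, PySem.List.insertBy, List.find?]
  simp [narrow_to_century, narrow_to_century_alt, altLoop, centSorted, centuriesA, h500, h400, h300, h200, h100, h0, beq_iff_eq, PySem.Dict.empty, PySem.Dict.insert, PySem.Dict.keys, PySem.Dict.get?, PySem.List.min?, PySem.List.sorted, PySem.List.insertBy, List.find?]
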